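-- pv_equiv track=rewrite | github.com/venkatmiriyala19/GeeksForGeeks | Boolean Matrix.py | booleanMatrix
-- ===== SOURCE A (Python) =====
-- def booleanMatrix(matrix):
--     # code here
--     row=set()
--     column=set()
--     for i in range(len(matrix)):
--         for j in range(len(matrix[i])):
--             if matrix[i][j]==1:
--                 row.add(i)
--                 column.add(j)
--     for i in range(len(matrix)):
--         for j in range(len(matrix[i])):
--             if i in row or j in column:
--                 matrix[i][j]=1
--     return matrix
-- ===== SOURCE B (Python) =====
-- def booleanMatrix(matrix):
--     matrix[:] = [[1 if 1 in row or any(j < len(r) and r[j] == 1 for r in matrix) else v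
--                   for j, v in enumerate(row)]
--                  for row in matrix]
--     return matrix
-- ===== Notes on version B (the rewrite author's own statement) =====
-- stated objective: simpler
-- what changed: B keeps no state at all: instead of A's two staged passes that build row/column index sets and then fill, B decides every output cell independently on demand by scanning its own row ('1 in row') and its own column (any(r[j]==1)), one nested comprehension.
import Mathlib
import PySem

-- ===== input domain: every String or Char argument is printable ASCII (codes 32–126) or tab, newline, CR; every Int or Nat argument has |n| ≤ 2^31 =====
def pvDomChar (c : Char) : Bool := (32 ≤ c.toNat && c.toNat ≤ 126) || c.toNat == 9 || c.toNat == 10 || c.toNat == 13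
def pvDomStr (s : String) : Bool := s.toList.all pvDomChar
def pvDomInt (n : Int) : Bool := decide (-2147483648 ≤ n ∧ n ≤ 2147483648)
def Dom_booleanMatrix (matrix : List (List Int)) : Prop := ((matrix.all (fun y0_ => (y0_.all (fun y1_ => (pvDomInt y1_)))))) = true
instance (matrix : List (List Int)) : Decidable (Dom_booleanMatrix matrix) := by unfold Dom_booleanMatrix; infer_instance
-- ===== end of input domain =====

-- B drops A's two staged passes and their row/column index sets entirely and decides each output
-- cell on demand by scanning its own row and its own column (objective: simpler, one comprehension).
-- Both programs mutate the argument list in place; the equivalence proved here is about the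
-- RETURN value (B's rows are freshly built list objects).

-- ===== PORT A =====
-- first pass: collect the set of row indices and of column indices holding a 1
def pvPass1 (matrix : List (List Int)) : PySem.Set Int × PySem.Set Int :=
  (PySem.List.pyRange 0 (PySem.List.len matrix) 1).foldl (fun rc i =>
    (PySem.List.pyRange 0 (PySem.List.len (PySem.List.pyGetD matrix i [])) 1).foldl (fun rc j =>
      if PySem.List.pyGetD (PySem.List.pyGetD matrix i []) j 0 = 1 then
        (PySem.Set.add rc.1 i, PySem.Set.add rc.2 j)
      else rc) rc) (PySem.Set.empty, PySem.Set.empty)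

-- second pass: matrix[i][j] = 1 whenever i in row or j in column (in-place, modelled by pySetD)
def pvPass2 (matrix : List (List Int)) (rc : PySem.Set Int × PySem.Set Int) : List (List Int) :=
  (PySem.List.pyRange 0 (PySem.List.len matrix) 1).foldl (fun m i =>
    (PySem.List.pyRange 0 (PySem.List.len (PySem.List.pyGetD m i [])) 1).foldl (fun m j =>
      if PySem.Set.contains rc.1 i || PySem.Set.contains rc.2 j then
        PySem.List.pySetD m i (PySem.List.pySetD (PySem.List.pyGetD m i []) j 1)
      else m) m) matrix

def booleanMatrix (matrix : List (List Int)) : List (List Int) :=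
  pvPass2 matrix (pvPass1 matrix)

-- ===== PORT B =====
-- each cell decided on demand: '1 in row or any(j < len(r) and r[j] == 1 for r in matrix)'
def booleanMatrix_alt (matrix : List (List Int)) : List (List Int) :=
  matrix.map (fun row =>
    (PySem.List.enumerate row 0).map (fun jv =>
      if row.contains 1
         || matrix.any (fun r =>
              decide (jv.1 < PySem.List.len r) && decide (PySem.List.pyGetD r jv.1 0 = 1))
      then 1 else jv.2))

-- ===== PRECONDITION & SPEC =====
def Spec_booleanMatrix (matrix : List (List Int)) (out : List (List Int)) : Prop := out = booleanMatrix_alt matrix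
instance (matrix : List (List Int)) (out : List (List Int)) : Decidable (Spec_booleanMatrix matrix out) := by unfold Spec_booleanMatrix; infer_instance

-- ===== CLAIM (what is proved, stated in full; the proofs are below) =====
def Claim_equal_booleanMatrix : Prop := ∀ (matrix : List (List Int)), Dom_booleanMatrix matrix → Spec_booleanMatrix matrix (booleanMatrix matrix)

-- ===== LEMMAS AND PROOFS =====

-- ---- pass 1: membership characterisation of the two index sets ----

-- inner collect loop, row component
theorem pv_inner1_mem_fst (r : List Int) (s0 i x : Int) (rc : PySem.Set Int × PySem.Set Int) :
    x ∈ ((PySem.List.enumerate r s0).foldl (fun rc q =>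
          if q.2 = 1 then (PySem.Set.add rc.1 i, PySem.Set.add rc.2 q.1) else rc) rc).1
      ↔ x ∈ rc.1 ∨ (x = i ∧ (1 : Int) ∈ r) := by
  induction r generalizing rc s0 with
  | nil => simp [PySem.List.enumerate_nil]
  | cons v r ih =>
    rw [PySem.List.enumerate_cons]
    simp only [List.foldl_cons, List.mem_cons]
    by_cases hv : v = 1
    · subst hv
      simp only [ih]
      simp [PySem.Set.mem_add]
      tauto
    · simp only [if_neg hv, ih]
      constructor
      · rintro (h | ⟨h1, h2⟩)
        · tauto
        · exact Or.inr ⟨h1, Or.inr h2⟩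
      · rintro (h | ⟨h1, h2 | h2⟩)
        · tauto
        · exact absurd h2.symm hv
        · tauto

-- inner collect loop, column component
theorem pv_inner1_mem_snd (r : List Int) (s0 i x : Int) (rc : PySem.Set Int × PySem.Set Int) :
    x ∈ ((PySem.List.enumerate r s0).foldl (fun rc q =>
          if q.2 = 1 then (PySem.Set.add rc.1 i, PySem.Set.add rc.2 q.1) else rc) rc).2
      ↔ x ∈ rc.2 ∨ ∃ q ∈ PySem.List.enumerate r s0, q.2 = 1 ∧ q.1 = x := by
  induction r generalizing rc s0 with
  | nil => simp [PySem.List.enumerate_nil]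
  | cons v r ih =>
    rw [PySem.List.enumerate_cons]
    simp only [List.foldl_cons, List.exists_mem_cons_iff]
    by_cases hv : v = 1
    · subst hv
      simp only [ih]
      simp [PySem.Set.mem_add]
      tauto
    · simp only [if_neg hv, ih]
      have : ¬ ((s0, v).2 = 1 ∧ (s0, v).1 = x) := by simpa using fun h _ => hv h
      tauto

-- pass-1 fold in enumerate form
def pvPass1Enum (rows : List (List Int)) (s : Int) (rc : PySem.Set Int × PySem.Set Int) :
    PySem.Set Int × PySem.Set Int :=
  (PySem.List.enumerate rows s).foldl (fun rc p =>
    (PySem.List.enumerate p.2 0).foldl (fun rc q =>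
      if q.2 = 1 then (PySem.Set.add rc.1 p.1, PySem.Set.add rc.2 q.1) else rc) rc) rc

theorem pvPass1_eq (matrix : List (List Int)) :
    pvPass1 matrix = pvPass1Enum matrix 0 (PySem.Set.empty, PySem.Set.empty) := by
  unfold pvPass1 pvPass1Enum
  rw [PySem.List.enumerate_eq_map_pyRange matrix ([] : List Int), List.foldl_map]
  apply PySem.List.foldl_congr_mem
  intro rc i _
  rw [PySem.List.enumerate_eq_map_pyRange (PySem.List.pyGetD matrix i []) (0 : Int), List.foldl_map]

theorem pvPass1Enum_mem_fst (rows : List (List Int)) (s x : Int)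
    (rc : PySem.Set Int × PySem.Set Int) :
    x ∈ (pvPass1Enum rows s rc).1
      ↔ x ∈ rc.1 ∨ ∃ p ∈ PySem.List.enumerate rows s, p.1 = x ∧ (1 : Int) ∈ p.2 := by
  induction rows generalizing rc s with
  | nil => simp [pvPass1Enum, PySem.List.enumerate_nil]
  | cons r rows ih =>
    unfold pvPass1Enum at *
    rw [PySem.List.enumerate_cons]
    simp only [List.foldl_cons, List.exists_mem_cons_iff]
    rw [ih, pv_inner1_mem_fst]
    tauto

theorem pvPass1Enum_mem_snd (rows : List (List Int)) (s x : Int)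
    (rc : PySem.Set Int × PySem.Set Int) :
    x ∈ (pvPass1Enum rows s rc).2
      ↔ x ∈ rc.2 ∨ ∃ r ∈ rows, ∃ q ∈ PySem.List.enumerate r 0, q.2 = 1 ∧ q.1 = x := by
  induction rows generalizing rc s with
  | nil => simp [pvPass1Enum, PySem.List.enumerate_nil]
  | cons r rows ih =>
    unfold pvPass1Enum at *
    rw [PySem.List.enumerate_cons]
    simp only [List.foldl_cons, List.exists_mem_cons_iff]
    rw [ih, pv_inner1_mem_snd]
    exact or_assoc

-- ---- pass 2: the in-place double loop is a per-cell map ----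

-- the inner write loop of pass 2 only rewrites row i
theorem pv_inner2_set (js : List Int) (cond : Int → Bool) (i : Nat) :
    ∀ (m : List (List Int)), i < m.length →
    js.foldl (fun m j => if cond j then
        PySem.List.pySetD m (i : Int) (PySem.List.pySetD (PySem.List.pyGetD m (i : Int) []) j 1)
      else m) m
      = m.set i (js.foldl (fun r j => if cond j then PySem.List.pySetD r j 1 else r) (m.getD i [])) := by
  induction js with
  | nil =>
    intro m hm
    simp only [List.foldl_nil]
    rw [List.getD_eq_getElem m [] hm, List.set_getElem_self]
  | cons j js ih =>
    intro m hm
    simp only [List.foldl_cons]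
    by_cases hc : cond j
    · simp only [if_pos hc]
      rw [PySem.List.pySetD_natCast, PySem.List.pyGetD_natCast]
      rw [ih (m.set i (PySem.List.pySetD (m.getD i []) j 1)) (by simpa using hm)]
      rw [List.set_set]
      congr 1
      rw [List.getD_eq_getElem _ _ (by simpa using hm), List.getElem_set_self]
    · simp only [if_neg hc]
      exact ih m hm

-- length invariants
theorem pv_rowfold_length (cond : Int → Bool) (js : List Int) :
    ∀ (r : List Int),
      (js.foldl (fun r j => if cond j then PySem.List.pySetD r j 1 else r) r).length = r.length := by
  induction js with
  | nil => intro r; rfl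
  | cons j js ih =>
    intro r
    simp only [List.foldl_cons]
    by_cases hc : cond j
    · rw [if_pos hc, ih, PySem.List.length_pySetD]
    · rw [if_neg hc, ih]

-- one row rewritten cell by cell: value at each position
theorem pv_rowfold_getD (cond : Int → Bool) (js : List Int) (hnn : ∀ j ∈ js, 0 ≤ j) :
    ∀ (r : List Int) (k : Nat) (hk : k < r.length),
      (js.foldl (fun r j => if cond j then PySem.List.pySetD r j 1 else r) r).getD k 0
        = if cond (k : Int) ∧ (k : Int) ∈ js then 1 else r[k] := by
  induction js with
  | nil =>
    intro r k hk
    show r.getD k 0 = _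
    rw [if_neg (by simp), List.getD_eq_getElem r 0 hk]
  | cons j js ih =>
    intro r k hk
    obtain ⟨n, rfl⟩ : ∃ n : Nat, j = (n : Int) :=
      ⟨j.toNat, (Int.toNat_of_nonneg (hnn j (List.mem_cons_self))).symm⟩
    have hnn' : ∀ j ∈ js, 0 ≤ j := fun j hj => hnn j (List.mem_cons_of_mem _ hj)
    simp only [List.foldl_cons, List.mem_cons]
    by_cases hc : cond (n : Int)
    · rw [if_pos hc, PySem.List.pySetD_natCast]
      rw [ih hnn' (r.set n 1) k (by simpa using hk), List.getElem_set]
      by_cases hkn : k = n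
      · subst hkn
        simp [hc]
      · have hne : (k : Int) ≠ (n : Int) := by exact_mod_cast hkn
        have hne' : n ≠ k := fun h => hkn h.symm
        simp [hne, hne']
    · rw [if_neg hc]
      rw [ih hnn' r k hk]
      by_cases hkn : (k : Int) = (n : Int)
      · have : cond (k : Int) = false := by rw [hkn]; exact Bool.eq_false_iff.mpr hc
        simp [this]
      · simp only [hkn, false_or]

-- a full left-to-right rewrite of one row is a map over its enumeration
theorem pv_rowfold_map (cond : Int → Bool) (r : List Int) :
    (PySem.List.pyRange 0 (PySem.List.len r) 1).foldl
        (fun r j => if cond j then PySem.List.pySetD r j 1 else r) r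
      = (PySem.List.enumerate r 0).map (fun jv => if cond jv.1 then 1 else jv.2) := by
  apply List.ext_getElem
  · rw [pv_rowfold_length, List.length_map, PySem.List.length_enumerate]
  · intro k hk1 hk2
    have hkr : k < r.length := by rw [pv_rowfold_length] at hk1; exact hk1
    have hnn : ∀ j ∈ PySem.List.pyRange 0 (PySem.List.len r) 1, (0:Int) ≤ j := by
      intro j hj; exact (PySem.List.mem_pyRange_one.mp hj).1
    rw [← List.getD_eq_getElem _ 0 hk1, pv_rowfold_getD cond _ hnn r k hkr]
    have hmem : (k : Int) ∈ PySem.List.pyRange 0 (PySem.List.len r) 1 := by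
      rw [PySem.List.mem_pyRange_one, PySem.List.len_eq]
      exact ⟨Int.natCast_nonneg k, by exact_mod_cast hkr⟩
    rw [List.getElem_map, PySem.List.getElem_enumerate]
    simp [hkr]

-- outer write loop: length and value of each row of the result
theorem pv_outerfold_getD (cond : Int → Int → Bool) (js : List Int)
    (hnd : js.Nodup) (hnn : ∀ j ∈ js, 0 ≤ j) :
    ∀ (m : List (List Int)),
      ((js.foldl (fun m i =>
          (PySem.List.pyRange 0 (PySem.List.len (PySem.List.pyGetD m i [])) 1).foldl
            (fun m j => if cond i j then
                PySem.List.pySetD m i (PySem.List.pySetD (PySem.List.pyGetD m i []) j 1)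
              else m) m) m).length = m.length) ∧
      ∀ (k : Nat) (hk : k < m.length),
        (js.foldl (fun m i =>
          (PySem.List.pyRange 0 (PySem.List.len (PySem.List.pyGetD m i [])) 1).foldl
            (fun m j => if cond i j then
                PySem.List.pySetD m i (PySem.List.pySetD (PySem.List.pyGetD m i []) j 1)
              else m) m) m).getD k []
          = if (k : Int) ∈ js then
              (PySem.List.pyRange 0 (PySem.List.len m[k]) 1).foldl
                (fun r j => if cond (k : Int) j then PySem.List.pySetD r j 1 else r) m[k]
            else m[k] := by
  induction js with
  | nil =>
    intro m
    refine ⟨rfl, fun k hk => ?_⟩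
    show m.getD k [] = _
    rw [if_neg (by simp), List.getD_eq_getElem m [] hk]
  | cons j js ih =>
    intro m
    obtain ⟨n, rfl⟩ : ∃ n : Nat, j = (n : Int) :=
      ⟨j.toNat, (Int.toNat_of_nonneg (hnn j (List.mem_cons_self))).symm⟩
    have hnd' : js.Nodup := hnd.of_cons
    have hnj : (n : Int) ∉ js := (List.nodup_cons.mp hnd).1
    have hnn' : ∀ j ∈ js, 0 ≤ j := fun j hj => hnn j (List.mem_cons_of_mem _ hj)
    simp only [List.foldl_cons]
    by_cases hlt : n < m.length
    · -- row n is rewritten in place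
      have hget : PySem.List.pyGetD m (n : Int) [] = m[n] := by
        rw [PySem.List.pyGetD_natCast, List.getD_eq_getElem _ _ hlt]
      rw [hget, pv_inner2_set _ (fun j => cond (n : Int) j) n m hlt]
      set r' := (PySem.List.pyRange 0 (PySem.List.len m[n]) 1).foldl
          (fun r j => if cond (n : Int) j then PySem.List.pySetD r j 1 else r) (m.getD n []) with hr'
      have hlen' : (m.set n r').length = m.length := by simp
      obtain ⟨ihlen, ihval⟩ := ih hnd' hnn' (m.set n r')
      refine ⟨by rw [ihlen, hlen'], fun k hk => ?_⟩
      rw [ihval k (by rw [hlen']; exact hk)]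
      by_cases hkn : k = n
      · subst hkn
        have hks : ((k : Int) ∈ (k : Int) :: js) := List.mem_cons_self
        rw [if_neg (by simpa using hnj), if_pos hks]
        rw [List.getElem_set_self, hr', List.getD_eq_getElem _ _ hlt]
      · have hcast : (k : Int) ≠ (n : Int) := by exact_mod_cast hkn
        rw [List.getElem_set_ne (fun h => hkn h.symm)]
        simp only [List.mem_cons, hcast, false_or]
    · -- row index n out of range: the inner loop runs over an empty range
      have hget : PySem.List.pyGetD m (n : Int) [] = [] := by
        rw [PySem.List.pyGetD_natCast, List.getD_eq_default _ _ (by omega)]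
      rw [hget]
      have : PySem.List.pyRange 0 (PySem.List.len ([] : List Int)) 1 = [] := by
        simp [PySem.List.len_eq]
      rw [this]
      simp only [List.foldl_nil]
      obtain ⟨ihlen, ihval⟩ := ih hnd' hnn' m
      refine ⟨ihlen, fun k hk => ?_⟩
      rw [ihval k hk]
      have hcast : (k : Int) ≠ (n : Int) := by
        intro h
        have : k = n := by exact_mod_cast h
        omega
      simp only [List.mem_cons, hcast, false_or]

-- pass 2 as a per-cell map (main pass-2 lemma)
theorem pvPass2_map (matrix : List (List Int)) (rc : PySem.Set Int × PySem.Set Int) :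
    pvPass2 matrix rc
      = (PySem.List.enumerate matrix 0).map (fun p =>
          (PySem.List.enumerate p.2 0).map (fun jv =>
            if PySem.Set.contains rc.1 p.1 || PySem.Set.contains rc.2 jv.1 then 1 else jv.2)) := by
  have hnn : ∀ j ∈ PySem.List.pyRange 0 (PySem.List.len matrix) 1, (0:Int) ≤ j :=
    fun j hj => (PySem.List.mem_pyRange_one.mp hj).1
  obtain ⟨hlen, hval⟩ := pv_outerfold_getD (fun i j => PySem.Set.contains rc.1 i || PySem.Set.contains rc.2 j)
      (PySem.List.pyRange 0 (PySem.List.len matrix) 1)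
      (PySem.List.nodup_pyRange_one _ _) hnn matrix
  unfold pvPass2
  apply List.ext_getElem
  · rw [List.length_map, PySem.List.length_enumerate]
    exact hlen
  · intro k hk1 hk2
    have hkm : k < matrix.length := by rw [hlen] at hk1; exact hk1
    rw [← List.getD_eq_getElem _ [] hk1, hval k hkm]
    have hmem : (k : Int) ∈ PySem.List.pyRange 0 (PySem.List.len matrix) 1 := by
      rw [PySem.List.mem_pyRange_one, PySem.List.len_eq]
      exact ⟨Int.natCast_nonneg k, by exact_mod_cast hkm⟩
    rw [if_pos hmem, pv_rowfold_map]
    rw [List.getElem_map, PySem.List.getElem_enumerate]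
    simp

-- ---- the per-cell condition of A equals the per-cell condition of B ----

theorem pv_rows_mem (matrix : List (List Int)) (k : Nat) (hk : k < matrix.length) :
    ((k : Int) ∈ (pvPass1 matrix).1) ↔ (1 : Int) ∈ matrix[k] := by
  rw [pvPass1_eq, pvPass1Enum_mem_fst]
  constructor
  · rintro (h | ⟨p, hp, h1, h2⟩)
    · simp [PySem.Set.empty] at h
    · rw [PySem.List.mem_enumerate_iff] at hp
      obtain ⟨k', hk', rfl⟩ := hp
      simp only at h1 h2
      have : k' = k := by omega
      subst this
      exact h2
  · intro h
    refine Or.inr ⟨((k : Int), matrix[k]), ?_, rfl, h⟩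
    rw [PySem.List.mem_enumerate_iff]
    exact ⟨k, hk, by simp⟩

theorem pv_cols_mem (matrix : List (List Int)) (k : Nat) :
    ((k : Int) ∈ (pvPass1 matrix).2)
      ↔ ∃ r ∈ matrix, (k : Int) < PySem.List.len r ∧ PySem.List.pyGetD r (k : Int) 0 = 1 := by
  rw [pvPass1_eq, pvPass1Enum_mem_snd]
  constructor
  · rintro (h | ⟨r, hr, q, hq, h1, h2⟩)
    · simp [PySem.Set.empty] at h
    · rw [PySem.List.mem_enumerate_iff] at hq
      obtain ⟨k', hk', rfl⟩ := hq
      simp only at h1 h2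
      have hkk : k' = k := by omega
      subst hkk
      refine ⟨r, hr, ?_, ?_⟩
      · rw [PySem.List.len_eq]; exact_mod_cast hk'
      · rw [PySem.List.pyGetD_natCast, List.getD_eq_getElem _ _ hk']; exact h1
  · rintro ⟨r, hr, hlt, hv⟩
    have hk' : k < r.length := by rw [PySem.List.len_eq] at hlt; exact_mod_cast hlt
    refine Or.inr ⟨r, hr, ((k : Int), r[k]), ?_, ?_, rfl⟩
    · rw [PySem.List.mem_enumerate_iff]; exact ⟨k, hk', by simp⟩
    · rw [PySem.List.pyGetD_natCast, List.getD_eq_getElem _ _ hk'] at hv; exact hv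

-- ===== VERDICT (by name: the statement is the Claim_ definition above) =====
theorem booleanMatrix_spec : Claim_equal_booleanMatrix := by
  intro matrix _
  unfold Spec_booleanMatrix booleanMatrix
  rw [pvPass2_map]
  unfold booleanMatrix_alt
  rw [show matrix.map (fun row =>
      (PySem.List.enumerate row 0).map (fun jv =>
        if row.contains 1
           || matrix.any (fun r =>
                decide (jv.1 < PySem.List.len r) && decide (PySem.List.pyGetD r jv.1 0 = 1))
        then 1 else jv.2))
    = ((PySem.List.enumerate matrix 0).map (fun p => p.2)).map (fun row =>
      (PySem.List.enumerate row 0).map (fun jv =>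
        if row.contains 1
           || matrix.any (fun r =>
                decide (jv.1 < PySem.List.len r) && decide (PySem.List.pyGetD r jv.1 0 = 1))
        then 1 else jv.2)) from by rw [PySem.List.map_snd_enumerate]]
  rw [List.map_map]
  apply List.map_congr_left
  intro p hp
  rw [PySem.List.mem_enumerate_iff] at hp
  obtain ⟨k, hk, rfl⟩ := hp
  simp only [Function.comp]
  apply List.map_congr_left
  intro jv hjv
  rw [PySem.List.mem_enumerate_iff] at hjv
  obtain ⟨k', hk', rfl⟩ := hjv
  have hcond : (PySem.Set.contains (pvPass1 matrix).1 (0 + (k:Int))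
        || PySem.Set.contains (pvPass1 matrix).2 (0 + (k':Int)))
      = ((matrix[k]'hk).contains 1
         || matrix.any (fun r => decide ((0 + (k':Int)) < PySem.List.len r)
              && decide (PySem.List.pyGetD r (0 + (k':Int)) 0 = 1))) := by
    rw [Bool.eq_iff_iff]
    simp only [Bool.or_eq_true, PySem.Set.contains, List.contains_iff_mem, List.any_eq_true,
      Bool.and_eq_true, decide_eq_true_eq]
    rw [show ((0:Int) + (k:Int)) = ((k:Nat) : Int) from by omega,
        show ((0:Int) + (k':Int)) = ((k':Nat) : Int) from by omega]
    rw [pv_rows_mem matrix k hk, pv_cols_mem matrix k']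
  rw [hcond]
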